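-- pv_equiv track=rewrite | github.com/Malignant-18/Concentro | public/backend.py | check_url_patterns
-- ===== SOURCE A (Python) =====
-- from typing import Optional, List
--
-- def check_url_patterns(url: str, whitelist: List[str], blacklist: List[str]) -> Optional[bool]:
--     """
--     Check if URL matches any whitelist or blacklist patterns
--     Returns:
--         - True if whitelisted
--         - False if blacklisted
--         - None if no match
--     """
--     # Check whitelist
--     for pattern in whitelist:
--         if pattern in url:
--             return True
--
--     # Check blacklist
--     for pattern in blacklist:
--         if pattern in url:
--             return False
--
--     return None
-- ===== SOURCE B (Python) =====
-- def _matches_any(url, patterns):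
--     # group patterns by length, then hash-index the url's windows of each length
--     by_len = {}
--     for p in patterns:
--         by_len.setdefault(len(p), []).append(p)
--     n = len(url)
--     for length, ps in by_len.items():
--         windows = {url[j:j + length] for j in range(n - length + 1)}
--         for p in ps:
--             if p in windows:
--                 return True
--     return False
--
-- def check_url_patterns(url, whitelist, blacklist):
--     if _matches_any(url, whitelist):
--         return True
--     if _matches_any(url, blacklist):
--         return False
--     return None
-- ===== Notes on version B (the rewrite author's own statement) =====
-- stated objective: alternative
-- what changed: Replaces A's per-pattern 'pattern in url' substring searches by grouping the patterns by length in a dict and, per distinct length, building a hash set of all url windows of that length and testing each pattern by set membership.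
import Mathlib
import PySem

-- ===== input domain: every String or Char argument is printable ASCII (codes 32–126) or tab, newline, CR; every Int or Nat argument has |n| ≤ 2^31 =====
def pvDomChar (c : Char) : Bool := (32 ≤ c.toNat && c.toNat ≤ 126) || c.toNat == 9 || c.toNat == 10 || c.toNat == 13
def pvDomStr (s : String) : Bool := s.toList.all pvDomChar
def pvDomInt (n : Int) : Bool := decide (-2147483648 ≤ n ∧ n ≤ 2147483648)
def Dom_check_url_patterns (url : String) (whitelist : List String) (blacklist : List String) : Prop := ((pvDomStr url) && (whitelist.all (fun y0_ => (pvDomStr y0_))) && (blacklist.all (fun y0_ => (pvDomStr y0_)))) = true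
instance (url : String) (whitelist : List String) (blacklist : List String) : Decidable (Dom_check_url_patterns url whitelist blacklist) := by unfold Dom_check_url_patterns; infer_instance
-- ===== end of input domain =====

-- B groups the patterns by length and tests each against a hash set of the url's windows of that length, instead of A's per-pattern substring scan; alternative structure, same semantics.


-- ===== PORT A =====
-- for pattern in whitelist: if pattern in url: return True  — first loop;
-- for pattern in blacklist: if pattern in url: return False — second loop;
-- the early-return scan of each loop is the Bool `any` over the list.
def check_url_patterns (url : String) (whitelist : List String) (blacklist : List String) : Option Bool :=
  if whitelist.any (fun pattern => PySem.Str.isIn pattern url) then some true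
  else if blacklist.any (fun pattern => PySem.Str.isIn pattern url) then some false
  else none

-- ===== PORT B =====
-- _matches_any: group patterns by length into a dict (by_len.setdefault(len(p), []).append(p)
-- ported as Dict.modify (len p) [] (· ++ [p])), then for each (length, ps) build the set of
-- url windows of that length ({url[j:j+length] for j in range(n-length+1)} as Set.ofList of the
-- mapped pyRange) and test each pattern by set membership; early-return True = `any`.
def matchesAny (url : String) (patterns : List String) : Bool :=
  let byLen := patterns.foldl
    (fun d p => d.modify ((PySem.Str.len p : Int)) [] (· ++ [p])) PySem.Dict.empty
  byLen.items.any (fun kv =>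
    let windows := PySem.Set.ofList
      ((PySem.List.pyRange 0 ((PySem.Str.len url : Int) - kv.1 + 1) 1).map
        (fun j => PySem.Str.slice url (some j) (some (j + kv.1))))
    kv.2.any (fun p => windows.contains p))

def check_url_patterns_alt (url : String) (whitelist : List String) (blacklist : List String) : Option Bool :=
  if matchesAny url whitelist then some true
  else if matchesAny url blacklist then some false
  else none

-- ===== PRECONDITION & SPEC =====
def Spec_check_url_patterns (url : String) (whitelist : List String) (blacklist : List String) (out : Option Bool) : Prop := out = check_url_patterns_alt url whitelist blacklist
instance (url : String) (whitelist : List String) (blacklist : List String) (out : Option Bool) : Decidable (Spec_check_url_patterns url whitelist blacklist out) := by unfold Spec_check_url_patterns; infer_instance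

-- ===== CLAIM (what is proved, stated in full; the proofs are below) =====
def Claim_equal_check_url_patterns : Prop := ∀ (url : String) (whitelist : List String) (blacklist : List String), Dom_check_url_patterns url whitelist blacklist → Spec_check_url_patterns url whitelist blacklist (check_url_patterns url whitelist blacklist)

-- ===== LEMMAS AND PROOFS =====

-- the window set for length len(p) contains p iff Python's `p in url` holds
lemma contains_windows (url p : String) :
    (PySem.Set.ofList ((PySem.List.pyRange 0 ((PySem.Str.len url : Int) - (PySem.Str.len p : Int) + 1) 1).map
      (fun j => PySem.Str.slice url (some j) (some (j + (PySem.Str.len p : Int)))))).contains p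
      = PySem.Str.isIn p url := by
  rw [Bool.eq_iff_iff, PySem.Set.contains_iff, PySem.Set.mem_ofList, List.mem_map]
  rw [PySem.Str.isIn_eq, ← PySem.Chars.exists_prefix_drop_iff_isIn]
  constructor
  · rintro ⟨j, hj, hsl⟩
    rw [PySem.List.mem_pyRange_one] at hj
    obtain ⟨h0, hlt⟩ := hj
    refine ⟨j.toNat, ?_⟩
    have hj' : j = ((j.toNat : Nat) : Int) := by omega
    rw [hj'] at hsl
    have h2 : (PySem.Str.slice url (some (j.toNat : Int)) (some ((j.toNat : Int) + (PySem.Str.len p : Int)))).toList = p.toList := by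
      rw [hsl]
    simp only [PySem.Str.toList_slice, PySem.Chars.slice_eq_listSlice, PySem.Str.len_eq] at h2
    rw [PySem.List.slice_natCast_add] at h2
    rw [← h2]
    exact List.take_prefix _ _
  · rintro ⟨j, hj⟩
    by_cases hju : j ≤ url.toList.length
    · have hlen : p.toList.length ≤ url.toList.length - j := by
        have := hj.length_le
        simpa using this
      refine ⟨(j : Int), ?_, ?_⟩
      · rw [PySem.List.mem_pyRange_one]
        simp only [PySem.Str.len_eq]
        omega
      · apply String.toList_inj.mp
        simp only [PySem.Str.toList_slice, PySem.Chars.slice_eq_listSlice, PySem.Str.len_eq]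
        rw [PySem.List.slice_natCast_add]
        exact (List.prefix_iff_eq_take.mp hj).symm
    · have hnil : p.toList = [] := by
        have hd : url.toList.drop j = [] := List.drop_eq_nil_of_le (by omega)
        rw [hd] at hj
        exact List.prefix_nil.mp hj
      refine ⟨(0 : Int), ?_, ?_⟩
      · rw [PySem.List.mem_pyRange_one]
        simp only [PySem.Str.len_eq, hnil]
        simp
      · apply String.toList_inj.mp
        simp only [PySem.Str.toList_slice, PySem.Chars.slice_eq_listSlice, PySem.Str.len_eq, hnil]
        have h0 : ((0:Int)) = ((0:Nat) : Int) := rfl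
        rw [h0, PySem.List.slice_natCast_add]
        simp

-- B's grouped positional scan agrees with A's per-pattern substring test
lemma matchesAny_eq (url : String) (ps : List String) :
    matchesAny url ps = ps.any (fun p => PySem.Str.isIn p url) := by
  have hW := contains_windows url
  have hnd : (ps.foldl (fun d p => d.modify ((PySem.Str.len p : Int)) [] (· ++ [p])) PySem.Dict.empty).keys.Nodup :=
    PySem.Dict.nodup_keys_foldl_modify_key ps (fun p => ((PySem.Str.len p : Int))) [] (fun d p => (· ++ [p])) PySem.Dict.empty (by simp [PySem.Dict.keys_empty])
  have hkeys : (ps.foldl (fun d p => d.modify ((PySem.Str.len p : Int)) [] (· ++ [p])) PySem.Dict.empty).keys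
      = PySem.Set.ofList (ps.map (fun p => ((PySem.Str.len p : Int)))) := by
    rw [PySem.Dict.keys_foldl_modify_key]
    rw [PySem.Dict.keys_empty, PySem.Set.update_nil_left]
  have hgetD : ∀ L, (ps.foldl (fun d p => d.modify ((PySem.Str.len p : Int)) [] (· ++ [p])) PySem.Dict.empty).getD L []
      = ps.filter (fun p => ((PySem.Str.len p : Int)) == L) := by
    intro L
    have hfm := List.foldl_map (f := (fun p => ((PySem.Str.len p : Int), p))) (g := (fun (d : PySem.Dict Int (List String)) q => d.modify q.1 [] (· ++ [q.2]))) (l := ps) (init := PySem.Dict.empty)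
    rw [← hfm]
    rw [PySem.Dict.getD_foldl_modify_append]
    simp [PySem.Dict.getD_empty, List.filter_map, Function.comp_def]
  have hitems := PySem.Dict.items_eq_map_keys _ hnd ([] : List String)
  unfold matchesAny
  rw [Bool.eq_iff_iff]
  simp only [hitems, hkeys, hgetD, List.any_map, List.any_eq_true, PySem.Set.mem_ofList,
    List.mem_map]
  simp only [Function.comp_def, List.any_eq_true, List.mem_filter, beq_iff_eq]
  constructor
  · rintro ⟨L, ⟨p0, hp0, hL0⟩, p, ⟨hp, hL⟩, hc⟩
    subst hL
    rw [hW p] at hc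
    exact ⟨p, hp, hc⟩
  · rintro ⟨p, hp, hin⟩
    exact ⟨PySem.Str.len p, ⟨p, hp, rfl⟩, p, ⟨hp, rfl⟩, by rw [hW p]; exact hin⟩

-- ===== VERDICT (by name: the statement is the Claim_ definition above) =====
theorem check_url_patterns_spec : Claim_equal_check_url_patterns := by
  intro url wl bl _
  unfold Spec_check_url_patterns check_url_patterns check_url_patterns_alt
  rw [matchesAny_eq, matchesAny_eq]
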